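-- pv_equiv track=rewrite | github.com/NVIDIA/NVFlare | nvflare/private/fed/utils/fed_utils.py | split_gpus
-- ===== SOURCE A (Python) =====
-- def find_char_positions(s, ch):
--     return [i for i, c in enumerate(s) if c == ch]
--
-- def split_gpus(gpus) -> [str]:
--     gpus = gpus.replace(" ", "")
--     lefts = find_char_positions(gpus, "[")
--     rights = find_char_positions(gpus, "]")
--     if len(lefts) != len(rights):
--         raise ValueError("brackets not paired")
--     for i in range(len(lefts)):
--         if i > 0 and lefts[i] < rights[i - 1]:
--             raise ValueError("brackets cannot be nested")
--
--     offset = 0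
--     for i in range(len(lefts)):
--         l: int = lefts[i] - offset
--         r: int = rights[i] - offset
--         if l > r:
--             raise ValueError("brackets not properly paired")
--
--         if l > 0 and gpus[l - 1] != ",":
--             raise ValueError(f"invalid start of a group: {gpus[l - 1]}")
--         if r < len(gpus) - 1 and gpus[r + 1] != ",":
--             raise ValueError(f"invalid end of a group: {gpus[r + 1]}")
--         g = gpus[l : r + 1]  # include both left and right brackets
--         p = g[1:-1].replace(",", "^")
--         gpus = gpus.replace(g, p, 1)  # only replace the first occurrence!
--         offset += 2  # everything after the replacement is shifted to left by 2 (since the pair of brackets removed)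
--
--     result = gpus.split(",")
--     result = [g.replace("^", ",") for g in result]
--     return result
-- ===== SOURCE B (Python) =====
-- def split_gpus(gpus) -> [str]:
--     # Single forward scan with a bracket-depth flag and a token buffer, instead of
--     # A's index bookkeeping (find positions, offsets, replace-first-occurrence).
--     # On malformed input a ValueError is raised (message/order may differ from A;
--     # such inputs are excluded by Pre_).  Unlike A, a literal '^' in the input is
--     # kept as-is (A's internal sentinel turns it into ','); see D_.
--     s = gpus.replace(" ", "")
--     result = []
--     buf = []
--     depth = 0
--     fresh = True  # at the start or right after a top-level comma
--     for i, c in enumerate(s):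
--         if c == "[":
--             if depth:
--                 raise ValueError("brackets cannot be nested")
--             if not fresh:
--                 raise ValueError(f"invalid start of a group: {s[i - 1]}")
--             depth = 1
--         elif c == "]":
--             if depth == 0:
--                 raise ValueError("brackets not paired")
--             if i + 1 < len(s) and s[i + 1] != ",":
--                 raise ValueError(f"invalid end of a group: {s[i + 1]}")
--             depth = 0
--         elif c == "," and depth == 0:
--             result.append("".join(buf))
--             buf = []
--             fresh = True
--             continue
--         else:
--             buf.append(c)
--         fresh = False
--     if depth:
--         raise ValueError("brackets not paired")
--     result.append("".join(buf))
--     return result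
-- ===== Notes on version B (the rewrite author's own statement) =====
-- stated objective: simpler
-- what changed: A finds all bracket positions up front and repeatedly rewrites the string via offsets and replace-first-occurrence before a final split; B is one forward scan with a depth flag and a token buffer that emits tokens directly, never rewriting the string. Pre_ excludes inputs containing '^' (A's internal escape sentinel for in-bracket commas): there A silently turns every '^' into ',' in its output, an accident of the encoding that B does not reproduce.
-- outside the precondition, e.g. on split_gpus('a^b'): A returns ['a,b'], B returns ['a^b']
import Mathlib
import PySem

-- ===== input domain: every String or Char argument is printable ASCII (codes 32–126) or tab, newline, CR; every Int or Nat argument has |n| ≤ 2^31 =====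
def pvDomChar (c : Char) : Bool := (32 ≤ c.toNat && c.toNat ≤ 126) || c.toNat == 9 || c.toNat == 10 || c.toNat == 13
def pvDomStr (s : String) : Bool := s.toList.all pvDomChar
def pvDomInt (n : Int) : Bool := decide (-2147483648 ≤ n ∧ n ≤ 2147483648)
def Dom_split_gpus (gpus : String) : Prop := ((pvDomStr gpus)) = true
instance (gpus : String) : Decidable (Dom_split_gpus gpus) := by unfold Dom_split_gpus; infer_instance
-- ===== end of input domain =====

-- B replaces A's position lists + offset bookkeeping + repeated replace-first-occurrence
-- with a single forward scan (depth flag + token buffer); return values proved equal on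
-- every well-formed input admitted by Pre_ below.

-- ===== PORT A =====
-- [i for i, c in enumerate(s) if c == ch]
def find_char_positions (s : List Char) (ch : Char) : List Int :=
  ((PySem.List.enumerate s).filter (fun p => p.2 == ch)).map (fun p => p.1)

-- Python s.replace(old, new, 1) for nonempty old: rewrite the first occurrence, if any
-- (exact: Chars.find is the first occurrence index, -1 if absent; A only calls it with
-- old = "[...]", which is nonempty)
def pyReplace1 (s old new : List Char) : List Char :=
  let i := PySem.Chars.find s old
  if i = -1 then s else s.take i.toNat ++ new ++ s.drop (i.toNat + old.length)

-- the 'for i in range(len(lefts))' rewrite loop, one step per (lefts[i], rights[i]) pair,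
-- carrying (gpus, offset); none = ValueError
def splitGpusLoopA : List (Int × Int) → List Char → Int → Option (List Char)
  | [], s, _ => some s
  | (li, ri) :: rest, s, off =>
    let l := li - off
    let r := ri - off
    if l > r then none
    else if l > 0 && !(PySem.List.pyGetD s (l - 1) ' ' == ',') then none
    else if r < PySem.List.len s - 1 && !(PySem.List.pyGetD s (r + 1) ' ' == ',') then none
    else
      let g := PySem.List.slice s (some l) (some (r + 1))
      let p := PySem.Chars.replace (PySem.List.slice g (some 1) (some (-1))) [','] ['^']
      splitGpusLoopA rest (pyReplace1 s g p) (off + 2)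

def split_gpus (gpus : String) : List String :=
  let s := PySem.Chars.replace gpus.toList [' '] []
  let lefts := find_char_positions s '['
  let rights := find_char_positions s ']'
  if lefts.length ≠ rights.length then []     -- raise ValueError("brackets not paired")
  -- 'for i in range(len(lefts)): if i > 0 and lefts[i] < rights[i-1]': the i > 0 guard
  -- makes this a scan of the consecutive pairs (lefts[i], rights[i-1]), i.e. of
  -- (lefts.drop 1).zip rights; any hit raises ValueError("brackets cannot be nested")
  else if ((lefts.drop 1).zip rights).any (fun p => p.1 < p.2) then []
  else match splitGpusLoopA (lefts.zip rights) s 0 with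
    | none => []                               -- the loop raised a ValueError
    | some s' =>
      (PySem.Chars.splitOn s' [',']).map (fun g => String.ofList (PySem.Chars.replace g ['^'] [',']))

-- ===== PORT B =====
-- the 'for i, c in enumerate(s)' scan of Source B: depth flag, fresh flag, token buffer buf,
-- result accumulator acc; none = ValueError; Source B's 's[i+1]' lookahead is the head of rest
def splitGpusScanB : List Char → Bool → Bool → List Char → List (List Char) → Option (List (List Char))
  | [], depth, _, buf, acc => if depth then none else some (acc ++ [buf])
  | c :: rest, depth, fresh, buf, acc =>
    if c == '[' then
      if depth then none
      else if !fresh then none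
      else splitGpusScanB rest true false buf acc
    else if c == ']' then
      if !depth then none
      else if (match rest with | c2 :: _ => c2 != ',' | [] => false) then none
      else splitGpusScanB rest false false buf acc
    else if c == ',' && !depth then
      splitGpusScanB rest false true [] (acc ++ [buf])
    else splitGpusScanB rest depth false (buf ++ [c]) acc

def split_gpus_alt (gpus : String) : List String :=
  let s := PySem.Chars.replace gpus.toList [' '] []
  match splitGpusScanB s false true [] [] with
  | none => []
  | some toks => toks.map String.ofList

-- ===== PRECONDITION & SPEC =====
-- Pre_: the despaced strings on which A returns normally — bracket depth stays in {0,1}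
-- on every prefix ('[' only at depth 0, ']' only at depth 1), brackets balanced, every
-- '[' at the start or preceded by ',', every ']' at the end or followed by ',' — minus
-- one carve-out: Pre_ also excludes inputs containing '^', A's internal escape sentinel
-- for commas inside brackets; on those A returns a value with every '^' silently turned
-- into ',' (an accident of the encoding) which B, returning the characters as written,
-- does not reproduce.
def Pre_split_gpus (gpus : String) : Prop :=
  '^' ∉ gpus.toList ∧
  let s := PySem.Chars.replace gpus.toList [' '] []
  (∀ i, i ≤ s.length → (s.take i).count ']' ≤ (s.take i).count '[' ∧
      (s.take i).count '[' ≤ (s.take i).count ']' + 1)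
  ∧ s.count '[' = s.count ']'
  ∧ (∀ i, i < s.length →
      (s[i]? = some '[' → i = 0 ∨ s[i-1]? = some ',') ∧
      (s[i]? = some ']' → i + 1 = s.length ∨ s[i+1]? = some ','))
instance (gpus : String) : Decidable (Pre_split_gpus gpus) := by unfold Pre_split_gpus; infer_instance
def pvWitness_split_gpus : String := "[0,1],2"

def Spec_split_gpus (gpus : String) (out : List String) : Prop := out = split_gpus_alt gpus
instance (gpus : String) (out : List String) : Decidable (Spec_split_gpus gpus out) := by unfold Spec_split_gpus; infer_instance

-- ===== CLAIM (what is proved, stated in full; the proofs are below) =====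
def Claim_equal_split_gpus : Prop := ∀ (gpus : String), Dom_split_gpus gpus → Pre_split_gpus gpus → Spec_split_gpus gpus (split_gpus gpus)

-- ===== LEMMAS AND PROOFS =====

theorem pvReplaceGo_single (a b : Char) : ∀ (l : List Char) (fuel : Nat) (acc : List Char),
    l.length ≤ fuel →
    PySem.Chars.replace.go [a] [b] fuel l acc
      = acc.reverse ++ l.map (fun c => if c = a then b else c) := by
  intro l
  induction l with
  | nil => intro fuel acc h; cases fuel <;> simp [PySem.Chars.replace.go]
  | cons c t ih =>
    intro fuel acc h
    cases fuel with
    | zero => simp at h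
    | succ m =>
      simp only [PySem.Chars.replace.go, List.isPrefixOf]
      by_cases hc : c = a
      · subst hc
        rw [if_pos (by simp)]
        simp only [List.length_cons, List.drop_succ_cons, List.length_nil, List.drop_zero]
        rw [ih m _ (by simpa using h)]
        simp
      · rw [if_neg (by simp [Ne.symm hc])]
        rw [ih m _ (by simpa using h)]
        simp [hc]

theorem pvReplace_single (a b : Char) (s : List Char) :
    PySem.Chars.replace s [a] [b] = s.map (fun c => if c = a then b else c) := by
  rw [PySem.Chars.replace]
  simp [pvReplaceGo_single a b s s.length [] le_rfl]

def pvSplitAux (cur : List Char) : List Char → List (List Char)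
  | [] => [cur]
  | c :: t => if c = ',' then cur :: pvSplitAux [] t else pvSplitAux (cur ++ [c]) t

theorem pvSplitGo (l : List Char) : ∀ (fuel : Nat) (cur : List Char) (acc : List (List Char)),
    l.length + 1 ≤ fuel →
    PySem.Chars.splitOn.go [','] fuel l cur acc
      = acc.reverse ++ pvSplitAux cur.reverse l := by
  induction l with
  | nil =>
    intro fuel cur acc h
    cases fuel with
    | zero => omega
    | succ m => simp [PySem.Chars.splitOn.go, pvSplitAux]
  | cons c t ih =>
    intro fuel cur acc h
    cases fuel with
    | zero => omega
    | succ m =>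
      simp only [PySem.Chars.splitOn.go, List.isPrefixOf]
      by_cases hc : c = ','
      · subst hc
        rw [if_pos (by simp)]
        simp only [List.length_cons, List.drop_succ_cons, List.length_nil, List.drop_zero]
        rw [ih m _ _ (by simp at h ⊢; omega)]
        simp [pvSplitAux]
      · rw [if_neg (by simp [Ne.symm hc])]
        rw [ih m _ _ (by simp at h ⊢; omega)]
        simp [pvSplitAux, hc]

theorem pvSplitOn_eq (s : List Char) :
    PySem.Chars.splitOn s [','] = pvSplitAux [] s := by
  rw [PySem.Chars.splitOn]
  rw [pvSplitGo s (s.length + 1) [] [] le_rfl]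
  simp

theorem pvSplitAux_prefix (p : List Char) : ∀ (cur rest : List Char), ',' ∉ p →
    pvSplitAux cur (p ++ rest) = pvSplitAux (cur ++ p) rest := by
  induction p with
  | nil => simp
  | cons c t ih =>
    intro cur rest hp
    simp only [List.mem_cons, not_or] at hp
    simp only [List.cons_append, pvSplitAux]
    rw [if_neg (fun hh => hp.1 hh.symm), ih _ _ hp.2]
    simp

theorem pvFindGo_skip (sub : List Char) (h0 : sub.head? = some '[') :
    ∀ (pre rest : List Char) (k : Nat), '[' ∉ pre →
    PySem.Chars.find.go sub (pre ++ rest) k = PySem.Chars.find.go sub rest (k + pre.length) := by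
  intro pre
  induction pre with
  | nil => simp
  | cons c t ih =>
    intro rest k hc
    simp only [List.mem_cons, not_or] at hc
    simp only [List.cons_append, PySem.Chars.find.go]
    rw [if_neg]
    · rw [ih _ _ hc.2]; congr 1; simp; omega
    · cases sub with
      | nil => simp at h0
      | cons s0 st =>
        simp at h0
        simp only [List.isPrefixOf, h0]
        intro hcc
        rw [Bool.and_eq_true] at hcc
        exact hc.1 (by simpa using hcc.1)

theorem pvFindGo_here (sub rest : List Char) (k : Nat) (hne : sub ≠ []) :
    PySem.Chars.find.go sub (sub ++ rest) k = (k : Int) := by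
  cases sub with
  | nil => simp at hne
  | cons s0 st =>
    simp only [List.cons_append, PySem.Chars.find.go]
    rw [if_pos (by rw [List.isPrefixOf_iff_prefix]; exact ⟨rest, by simp⟩)]

theorem pvFind_mid (pre g tail : List Char) (h0 : g.head? = some '[') (hp : '[' ∉ pre) :
    PySem.Chars.find (pre ++ g ++ tail) g = (pre.length : Int) := by
  rw [PySem.Chars.find, List.append_assoc, pvFindGo_skip g h0 pre _ 0 hp, Nat.zero_add,
    pvFindGo_here g tail pre.length (by rintro rfl; simp at h0)]

theorem pvReplace1_mid (pre g tail p : List Char) (h0 : g.head? = some '[') (hp : '[' ∉ pre) :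
    pyReplace1 (pre ++ g ++ tail) g p = pre ++ p ++ tail := by
  rw [pyReplace1, pvFind_mid pre g tail h0 hp]
  rw [if_neg (by omega)]
  simp only [Int.toNat_natCast]
  rw [show pre.length + g.length = (pre ++ g).length by simp, List.drop_left,
    List.append_assoc pre g tail, List.take_left]

theorem pvEnum_shift {α : Type} (xs : List α) : ∀ (s : Int),
    PySem.List.enumerate xs s = (PySem.List.enumerate xs 0).map (fun p => (p.1 + s, p.2)) := by
  induction xs with
  | nil => intro s; simp [PySem.List.enumerate_nil]
  | cons x t ih =>
    intro s
    rw [PySem.List.enumerate_cons, PySem.List.enumerate_cons, List.map_cons, ih (s+1),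
      show (0 : Int) + 1 = 1 from rfl, ih 1, List.map_map]
    congr 1
    · simp
    apply List.map_congr_left
    intro p _
    simp [Prod.ext_iff]; ring

theorem pvFcp_cons (c : Char) (t : List Char) (ch : Char) :
    find_char_positions (c :: t) ch
      = (if c = ch then [(0 : Int)] else []) ++ (find_char_positions t ch).map (· + 1) := by
  rw [find_char_positions, PySem.List.enumerate_cons, show (0 : Int) + 1 = 1 from rfl,
    pvEnum_shift t 1]
  by_cases hc : c = ch
  · subst hc
    simp [find_char_positions, List.filter_map, List.map_map, Function.comp_def]
  · simp [find_char_positions, hc, List.filter_map, List.map_map, Function.comp_def]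

theorem pvFcp_append (a b : List Char) (ch : Char) :
    find_char_positions (a ++ b) ch
      = find_char_positions a ch ++ (find_char_positions b ch).map (· + (a.length : Int)) := by
  induction a with
  | nil => simp [find_char_positions]
  | cons c t ih =>
    rw [List.cons_append, pvFcp_cons, pvFcp_cons, ih, List.append_assoc, List.map_append,
      List.map_map]
    congr 3
    · ext x : 1; simp; ring

inductive PvTok where
  | plain : List Char → PvTok
  | group : List Char → PvTok
deriving DecidableEq, Repr

def pvRenderTok : PvTok → List Char
  | .plain t => t
  | .group u => '[' :: u ++ [']']

def pvRender : List PvTok → List Char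
  | [] => []
  | [tok] => pvRenderTok tok
  | tok :: rest => pvRenderTok tok ++ ',' :: pvRender rest

@[simp] theorem pvRender_cons₂ (a b : PvTok) (t : List PvTok) :
    pvRender (a :: b :: t) = pvRenderTok a ++ ',' :: pvRender (b :: t) := rfl

def pvWfTok : PvTok → Prop
  | .plain t => '[' ∉ t ∧ ']' ∉ t ∧ ',' ∉ t
  | .group u => '[' ∉ u ∧ ']' ∉ u

def pvContent : PvTok → List Char
  | .plain t => t
  | .group u => u

def pvFlatTok : PvTok → List Char
  | .plain t => t
  | .group u => PySem.Chars.replace u [','] ['^']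

def pvFlatten : List PvTok → List Char
  | [] => []
  | [tok] => pvFlatTok tok
  | tok :: rest => pvFlatTok tok ++ ',' :: pvFlatten rest

@[simp] theorem pvFlatten_cons₂ (a b : PvTok) (t : List PvTok) :
    pvFlatten (a :: b :: t) = pvFlatTok a ++ ',' :: pvFlatten (b :: t) := rfl

def pvPairs : List PvTok → Int → List (Int × Int)
  | [], _ => []
  | .plain t :: rest, pos => pvPairs rest (pos + t.length + 1)
  | .group u :: rest, pos => (pos, pos + u.length + 1) :: pvPairs rest (pos + u.length + 3)

theorem pvPairs_shift (toks : List PvTok) : ∀ (pos a : Int),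
    pvPairs toks (pos + a) = (pvPairs toks pos).map (fun p => (p.1 + a, p.2 + a)) := by
  induction toks with
  | nil => intro pos a; simp [pvPairs]
  | cons tok rest ih =>
    intro pos a
    cases tok with
    | plain t =>
      show pvPairs rest (pos + a + t.length + 1) = _
      rw [show pos + a + (t.length : Int) + 1 = (pos + t.length + 1) + a by ring, ih]
      rfl
    | group u =>
      show ((pos + a, pos + a + u.length + 1) :: pvPairs rest (pos + a + u.length + 3)) = _
      rw [show pos + a + (u.length : Int) + 3 = (pos + u.length + 3) + a by ring, ih]
      simp [pvPairs]
      ring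

theorem pvFcp_eq_nil {s : List Char} {ch : Char} (h : ch ∉ s) : find_char_positions s ch = [] := by
  rw [find_char_positions, List.filter_eq_nil_iff.2, List.map_nil]
  intro p hp
  rw [PySem.List.mem_enumerate_iff] at hp
  obtain ⟨k, hk, rfl⟩ := hp
  simp only [beq_iff_eq]
  exact fun hc => h (by rw [← hc]; exact List.getElem_mem hk)

theorem pvFcp_group_left {u : List Char} (hu : '[' ∉ u) :
    find_char_positions ('[' :: u ++ [']']) '[' = [(0 : Int)] := by
  rw [show ('[' :: u ++ [']']) = '[' :: (u ++ [']']) from rfl, pvFcp_cons,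
    pvFcp_append, pvFcp_eq_nil hu, pvFcp_eq_nil (by simp)]
  simp

theorem pvFcp_group_right {u : List Char} (hu : ']' ∉ u) :
    find_char_positions ('[' :: u ++ [']']) ']' = [((u.length : Int) + 1)] := by
  rw [show ('[' :: u ++ [']']) = '[' :: (u ++ [']']) from rfl, pvFcp_cons,
    pvFcp_append, pvFcp_eq_nil hu]
  simp [find_char_positions, PySem.List.enumerate]

theorem pvFcp_sep (a s2 : List Char) (ch : Char) (hch : ch ≠ ',') :
    find_char_positions (a ++ ',' :: s2) ch
      = find_char_positions a ch ++ (find_char_positions s2 ch).map (· + ((a.length : Int) + 1)) := by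
  rw [pvFcp_append, pvFcp_cons, if_neg (fun hh => hch hh.symm), List.nil_append, List.map_map]
  congr 1
  apply List.map_congr_left
  intro x _
  simp; ring

theorem pvFcp_render (toks : List PvTok) (h : ∀ tok ∈ toks, pvWfTok tok) :
    find_char_positions (pvRender toks) '[' = (pvPairs toks 0).map Prod.fst ∧
    find_char_positions (pvRender toks) ']' = (pvPairs toks 0).map Prod.snd := by
  induction toks with
  | nil => simp [pvRender, pvPairs, find_char_positions, PySem.List.enumerate]
  | cons tok rest ih =>
    have htok := h tok (by simp)
    have hrest := fun t ht => h t (List.mem_cons_of_mem _ ht)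
    cases rest with
    | nil =>
      cases tok with
      | plain t =>
        obtain ⟨h1, h2, _⟩ := htok
        simp [pvRender, pvRenderTok, pvPairs, pvFcp_eq_nil h1, pvFcp_eq_nil h2]
      | group u =>
        obtain ⟨h1, h2⟩ := htok
        refine ⟨?_, ?_⟩
        · rw [show pvRender [.group u] = '[' :: u ++ [']'] from rfl, pvFcp_group_left h1]
          simp [pvPairs]
        · rw [show pvRender [.group u] = '[' :: u ++ [']'] from rfl, pvFcp_group_right h2]
          simp [pvPairs]
    | cons tok2 rest2 =>
      obtain ⟨ihl, ihr⟩ := ih hrest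
      cases tok with
      | plain t =>
        obtain ⟨h1, h2, _⟩ := htok
        have hp : pvPairs (PvTok.plain t :: tok2 :: rest2) 0
            = (pvPairs (tok2 :: rest2) 0).map
                (fun p => (p.1 + ((t.length : Int) + 1), p.2 + ((t.length : Int) + 1))) := by
          show pvPairs (tok2 :: rest2) (0 + (t.length : Int) + 1) = _
          rw [show (0 : Int) + (t.length : Int) + 1 = 0 + ((t.length : Int) + 1) by ring,
            pvPairs_shift]
        rw [pvRender_cons₂, show pvRenderTok (.plain t) = t from rfl,
          pvFcp_sep t _ '[' (by decide), pvFcp_sep t _ ']' (by decide),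
          pvFcp_eq_nil h1, pvFcp_eq_nil h2, ihl, ihr, hp]
        simp [List.map_map, Function.comp_def]
      | group u =>
        obtain ⟨h1, h2⟩ := htok
        have hp : pvPairs (PvTok.group u :: tok2 :: rest2) 0
            = ((0 : Int), (u.length : Int) + 1) :: (pvPairs (tok2 :: rest2) 0).map
                (fun p => (p.1 + ((u.length : Int) + 3), p.2 + ((u.length : Int) + 3))) := by
          show ((0 : Int), 0 + (u.length : Int) + 1) :: pvPairs (tok2 :: rest2) (0 + (u.length : Int) + 3) = _
          rw [show (0 : Int) + (u.length : Int) + 3 = 0 + ((u.length : Int) + 3) by ring,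
            pvPairs_shift]
          norm_num
        rw [pvRender_cons₂, show pvRenderTok (.group u) = '[' :: u ++ [']'] from rfl,
          show ('[' :: u ++ [']']) ++ ',' :: pvRender (tok2 :: rest2)
            = ('[' :: (u ++ [']'])) ++ ',' :: pvRender (tok2 :: rest2) by simp,
          pvFcp_sep _ _ '[' (by decide), pvFcp_sep _ _ ']' (by decide),
          show ('[' :: (u ++ [']'])) = '[' :: u ++ [']'] from rfl,
          pvFcp_group_left h1, pvFcp_group_right h2, ihl, ihr, hp]
        constructor
        · simp only [List.map_cons, List.map_map, List.singleton_append]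
          congr 1
          apply List.map_congr_left
          intro p _
          simp [List.length_append]
          ring
        · simp only [List.map_cons, List.map_map, List.singleton_append]
          congr 1
          apply List.map_congr_left
          intro p _
          simp [List.length_append]
          ring

def pvOrd : Int → List (Int × Int) → Prop
  | _, [] => True
  | lo, (l, r) :: ps => lo ≤ l ∧ l < r ∧ pvOrd (r + 1) ps

theorem pvOrd_pairs (toks : List PvTok) : ∀ (pos lo : Int), lo ≤ pos → pvOrd lo (pvPairs toks pos) := by
  induction toks with
  | nil => intro pos lo _; trivial
  | cons tok rest ih =>
    intro pos lo hlo
    cases tok with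
    | plain t => exact ih _ lo (le_trans hlo (by omega))
    | group u =>
      refine ⟨hlo, by omega, ih _ _ (by omega)⟩

theorem pvOrd_nonest : ∀ (ps : List (Int × Int)) (lo : Int), pvOrd lo ps →
    ((((ps.map Prod.fst).drop 1).zip (ps.map Prod.snd)).any (fun p => p.1 < p.2)) = false := by
  intro ps
  induction ps with
  | nil => intro lo _; rfl
  | cons p ps ih =>
    intro lo ho
    obtain ⟨l, r⟩ := p
    obtain ⟨_, _, ho2⟩ := ho
    cases ps with
    | nil => rfl
    | cons q qs =>
      obtain ⟨m, s⟩ := q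
      obtain ⟨hq1, hq2, hq3⟩ := ho2
      simp only [List.map_cons, List.drop_succ_cons, List.drop_zero, List.zip_cons_cons,
        List.any_cons, Bool.or_eq_false_iff]
      refine ⟨by simp; omega, ?_⟩
      have := ih (r + 1) ⟨hq1, hq2, hq3⟩
      simpa using this

theorem pvScan_plainseg : ∀ (t : List Char), (∀ c ∈ t, c ≠ '[' ∧ c ≠ ']' ∧ c ≠ ',') →
    ∀ (rest : List Char) (depth fresh : Bool) (buf : List Char) (acc : List (List Char)),
    splitGpusScanB (t ++ rest) depth fresh buf acc
      = splitGpusScanB rest depth (fresh && t.isEmpty) (buf ++ t) acc := by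
  intro t
  induction t with
  | nil => intro _ rest depth fresh buf acc; simp
  | cons c t ih =>
    intro h rest depth fresh buf acc
    obtain ⟨hc1, hc2, hc3⟩ := h c (by simp)
    rw [List.cons_append]
    simp only [splitGpusScanB]
    rw [if_neg (by simp [hc1]), if_neg (by simp [hc2]), if_neg (by simp [hc3]),
      ih (fun c hc => h c (by simp [hc])) rest depth false (buf ++ [c]) acc]
    simp

theorem pvScan_groupseg : ∀ (u : List Char), (∀ c ∈ u, c ≠ '[' ∧ c ≠ ']') →
    ∀ (rest : List Char) (fresh : Bool) (buf : List Char) (acc : List (List Char)),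
    splitGpusScanB (u ++ rest) true fresh buf acc
      = splitGpusScanB rest true (fresh && u.isEmpty) (buf ++ u) acc := by
  intro u
  induction u with
  | nil => intro _ rest fresh buf acc; simp
  | cons c t ih =>
    intro h rest fresh buf acc
    obtain ⟨hc1, hc2⟩ := h c (by simp)
    rw [List.cons_append]
    simp only [splitGpusScanB]
    rw [if_neg (by simp [hc1]), if_neg (by simp [hc2]),
      if_neg (by simp), ih (fun c hc => h c (by simp [hc])) rest false (buf ++ [c]) acc]
    simp

theorem pvScanB_render : ∀ (toks : List PvTok), toks ≠ [] → (∀ tok ∈ toks, pvWfTok tok) →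
    ∀ (acc : List (List Char)),
    splitGpusScanB (pvRender toks) false true [] acc = some (acc ++ toks.map pvContent) := by
  intro toks
  induction toks with
  | nil => intro h; exact absurd rfl h
  | cons tok rest ih =>
    intro _ h acc
    have htok := h tok (by simp)
    have hrest := fun t ht => h t (List.mem_cons_of_mem _ ht)
    cases rest with
    | nil =>
      cases tok with
      | plain t =>
        obtain ⟨h1, h2, h3⟩ := htok
        rw [show pvRender [PvTok.plain t] = t ++ [] by simp [pvRender, pvRenderTok],
          pvScan_plainseg t (fun c hc => ⟨by rintro rfl; exact h1 hc, by rintro rfl; exact h2 hc,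
            by rintro rfl; exact h3 hc⟩) [] false true [] acc]
        simp [splitGpusScanB, pvContent]
      | group u =>
        obtain ⟨h1, h2⟩ := htok
        rw [show pvRender [PvTok.group u] = '[' :: (u ++ [']']) by simp [pvRender, pvRenderTok],
          show splitGpusScanB ('[' :: (u ++ [']'])) false true [] acc
            = splitGpusScanB (u ++ [']']) true false [] acc by simp [splitGpusScanB],
          pvScan_groupseg u (fun c hc => ⟨by rintro rfl; exact h1 hc,
            by rintro rfl; exact h2 hc⟩) [']'] false [] acc]
        simp [splitGpusScanB, pvContent]
    | cons tok2 rest2 =>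
      cases tok with
      | plain t =>
        obtain ⟨h1, h2, h3⟩ := htok
        rw [pvRender_cons₂, show pvRenderTok (.plain t) = t from rfl,
          pvScan_plainseg t (fun c hc => ⟨by rintro rfl; exact h1 hc, by rintro rfl; exact h2 hc,
            by rintro rfl; exact h3 hc⟩) _ false true [] acc,
          show splitGpusScanB (',' :: pvRender (tok2 :: rest2)) false (true && t.isEmpty) ([] ++ t) acc
            = splitGpusScanB (pvRender (tok2 :: rest2)) false true [] (acc ++ [t]) by
              simp [splitGpusScanB],
          ih (by simp) hrest (acc ++ [t])]
        simp [pvContent]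
      | group u =>
        obtain ⟨h1, h2⟩ := htok
        rw [pvRender_cons₂, show pvRenderTok (.group u) = '[' :: u ++ [']'] from rfl,
          show ('[' :: u ++ [']']) ++ ',' :: pvRender (tok2 :: rest2)
            = '[' :: (u ++ (']' :: ',' :: pvRender (tok2 :: rest2))) by simp,
          show splitGpusScanB ('[' :: (u ++ (']' :: ',' :: pvRender (tok2 :: rest2)))) false true [] acc
            = splitGpusScanB (u ++ (']' :: ',' :: pvRender (tok2 :: rest2))) true false [] acc by
              simp [splitGpusScanB],
          pvScan_groupseg u (fun c hc => ⟨by rintro rfl; exact h1 hc,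
            by rintro rfl; exact h2 hc⟩) _ false [] acc,
          show splitGpusScanB (']' :: ',' :: pvRender (tok2 :: rest2)) true (false && u.isEmpty) ([] ++ u) acc
            = splitGpusScanB (',' :: pvRender (tok2 :: rest2)) false false u acc by
              simp [splitGpusScanB],
          show splitGpusScanB (',' :: pvRender (tok2 :: rest2)) false false u acc
            = splitGpusScanB (pvRender (tok2 :: rest2)) false true [] (acc ++ [u]) by
              simp [splitGpusScanB],
          ih (by simp) hrest (acc ++ [u])]
        simp [pvContent]

theorem pvSliceInner (u : List Char) :
    PySem.List.slice ('[' :: u ++ [']']) (some 1) (some (-1)) = u := by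
  rw [show (-1 : Int) = -((1:Nat):Int) by norm_num, PySem.List.slice]
  simp [PySem.List.clampIdx]
  rw [if_neg (by omega)]
  simp

theorem pvNoLb_flat {u : List Char} (h1 : '[' ∉ u) :
    '[' ∉ PySem.Chars.replace u [','] ['^'] := by
  rw [pvReplace_single]
  intro hm
  obtain ⟨x, hx, hxe⟩ := List.mem_map.1 hm
  by_cases hc : x = ','
  · simp [hc] at hxe
  · simp [hc] at hxe; exact h1 (hxe ▸ hx)

theorem pvLen_flat (u : List Char) :
    (PySem.Chars.replace u [','] ['^']).length = u.length := by
  rw [pvReplace_single, List.length_map]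

theorem pvLoopA_inv : ∀ (toks : List PvTok) (pre : List Char) (off : Int),
    (∀ tok ∈ toks, pvWfTok tok) →
    '[' ∉ pre →
    (toks ≠ [] → pre.getLast? = some ',' ∨ pre = []) →
    splitGpusLoopA (pvPairs toks ((pre.length : Int) + off)) (pre ++ pvRender toks) off
      = some (pre ++ pvFlatten toks) := by
  intro toks
  induction toks with
  | nil => intro pre off _ _ _; simp [pvPairs, pvRender, pvFlatten, splitGpusLoopA]
  | cons tok rest ih =>
    intro pre off h hpre hlast
    have htok := h tok (by simp)
    have hrest := fun t ht => h t (List.mem_cons_of_mem _ ht)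
    cases tok with
    | plain t =>
      obtain ⟨h1, h2, h3⟩ := htok
      cases rest with
      | nil => simp [pvPairs, pvRender, pvRenderTok, pvFlatten, pvFlatTok, splitGpusLoopA]
      | cons tok2 rest2 =>
        have hsh : (pre.length : Int) + off + t.length + 1
            = (((pre ++ (t ++ [','])).length : Int)) + off := by
          simp only [List.length_append, List.length_cons, List.length_nil]; push_cast; ring
        have hstr : pre ++ pvRender (PvTok.plain t :: tok2 :: rest2)
            = (pre ++ (t ++ [','])) ++ pvRender (tok2 :: rest2) := by
          rw [pvRender_cons₂]; simp [pvRenderTok]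
        rw [show pvPairs (PvTok.plain t :: tok2 :: rest2) ((pre.length : Int) + off)
            = pvPairs (tok2 :: rest2) ((pre.length : Int) + off + t.length + 1) from rfl,
          hsh, hstr, ih _ off hrest (by simp [hpre, h1])
            (fun _ => Or.inl (by rw [show pre ++ (t ++ [',']) = (pre ++ t) ++ [','] by simp,
              List.getLast?_concat]))]
        rw [pvFlatten_cons₂]
        simp [pvFlatTok]
    | group u =>
      obtain ⟨h1, h2⟩ := htok
      have hGhead : (('[' :: u ++ [']']) : List Char).head? = some '[' := by simp
      obtain ⟨tail, htail, htail2⟩ :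
          ∃ tail, pre ++ pvRender (PvTok.group u :: rest) = pre ++ ('[' :: u ++ [']']) ++ tail ∧
            (tail = [] ∧ rest = [] ∨ ∃ tok2 rest2, rest = tok2 :: rest2 ∧ tail = ',' :: pvRender rest) := by
        cases rest with
        | nil => exact ⟨[], by simp [pvRender, pvRenderTok], Or.inl ⟨rfl, rfl⟩⟩
        | cons tok2 rest2 =>
          exact ⟨',' :: pvRender (tok2 :: rest2), by rw [pvRender_cons₂]; simp [pvRenderTok],
            Or.inr ⟨tok2, rest2, rfl, rfl⟩⟩
      rw [show pvPairs (PvTok.group u :: rest) ((pre.length : Int) + off)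
          = ((pre.length : Int) + off, (pre.length : Int) + off + u.length + 1)
            :: pvPairs rest ((pre.length : Int) + off + u.length + 3) from rfl]
      rw [htail]
      rw [splitGpusLoopA]
      rw [if_neg (by push_cast; omega)]
      rw [if_neg ?hc2]
      case hc2 =>
        rcases (pre.eq_nil_or_concat).symm with ⟨q, a, rfl⟩ | rfl
        · simp only [List.concat_eq_append] at hpre hlast ⊢
          have ha : a = ',' := by
            rcases hlast (by simp) with hl | hl
            · rw [List.getLast?_concat] at hl; exact Option.some_injective _ hl
            · exact absurd hl (by simp)
          subst ha
          rw [show ((q ++ [',']).length : Int) + off - off - 1 = ((q.length : Nat) : Int) by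
            simp only [List.length_append, List.length_cons, List.length_nil]; push_cast; ring]
          rw [PySem.List.pyGetD_natCast]
          rw [show (q ++ [','] ++ ('[' :: u ++ [']']) ++ tail)
              = q ++ (',' :: (('[' :: u ++ [']']) ++ tail)) by simp]
          rw [List.getD_eq_getElem?_getD, List.getElem?_append_right (by omega)]
          simp
        · simp only [List.length_nil, Nat.cast_zero]
          rw [show (0 : Int) + off - off = 0 by ring]
          simp
      rw [if_neg ?hc3]
      case hc3 =>
        rcases htail2 with ⟨rfl, rfl⟩ | ⟨tok2, rest2, hrst, rfl⟩
        · simp only [List.append_nil, PySem.List.len_eq, Bool.and_eq_true, decide_eq_true_eq, not_and]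
          intro hlt
          exfalso
          simp only [List.length_append, List.length_cons, List.length_nil] at hlt
          push_cast at hlt
          omega
        · simp only [Bool.and_eq_true, not_and]
          intro _
          rw [show (pre.length : Int) + off + u.length + 1 - off + 1
              = (((pre ++ ('[' :: u ++ [']'])).length : Nat) : Int) by
            simp only [List.length_append, List.length_cons, List.length_nil]; push_cast; ring]
          rw [PySem.List.pyGetD_natCast]
          rw [show pre ++ ('[' :: u ++ [']']) ++ (',' :: pvRender rest)
              = (pre ++ ('[' :: u ++ [']'])) ++ (',' :: pvRender rest) by simp]
          rw [List.getD_eq_getElem?_getD, List.getElem?_append_right (by omega)]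
          simp
      -- reduce the let-bound g and p, then compute them
      show splitGpusLoopA (pvPairs rest ((pre.length : Int) + off + u.length + 3))
          (pyReplace1 (pre ++ ('[' :: u ++ [']']) ++ tail)
            (PySem.List.slice (pre ++ ('[' :: u ++ [']']) ++ tail)
              (some ((pre.length : Int) + off - off))
              (some ((pre.length : Int) + off + u.length + 1 - off + 1)))
            (PySem.Chars.replace
              (PySem.List.slice
                (PySem.List.slice (pre ++ ('[' :: u ++ [']']) ++ tail)
                  (some ((pre.length : Int) + off - off))
                  (some ((pre.length : Int) + off + u.length + 1 - off + 1)))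
                (some 1) (some (-1))) [','] ['^'])) (off + 2)
          = some (pre ++ pvFlatten (PvTok.group u :: rest))
      have hg : PySem.List.slice (pre ++ ('[' :: u ++ [']']) ++ tail)
          (some ((pre.length : Int) + off - off))
          (some ((pre.length : Int) + off + u.length + 1 - off + 1)) = ('[' :: u ++ [']']) := by
        rw [show (pre.length : Int) + off - off = ((pre.length : Nat) : Int) by push_cast; ring,
          show (pre.length : Int) + off + u.length + 1 - off + 1
            = (((pre.length + (u.length + 2)) : Nat) : Int) by push_cast; ring,
          PySem.List.slice_natCast]
        rw [List.append_assoc, List.drop_left]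
        rw [show pre.length + (u.length + 2) - pre.length
          = (('[' :: u ++ [']']) : List Char).length by simp]
        exact List.take_left
      rw [hg, pvSliceInner]
      rw [pvReplace1_mid pre ('[' :: u ++ [']']) tail _ hGhead hpre]
      -- recurse
      rcases htail2 with ⟨rfl, rfl⟩ | ⟨tok2, rest2, hrst, rfl⟩
      · simp [pvPairs, splitGpusLoopA, pvFlatten, pvFlatTok]
      · subst hrst
        have hsh : (pre.length : Int) + off + u.length + 3
            = (((pre ++ PySem.Chars.replace u [','] ['^'] ++ [',']).length : Nat) : Int) + (off + 2) := by
          simp only [List.length_append, List.length_cons, List.length_nil, pvLen_flat]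
          push_cast; ring
        have hstr : pre ++ PySem.Chars.replace u [','] ['^'] ++ ',' :: pvRender (tok2 :: rest2)
            = (pre ++ PySem.Chars.replace u [','] ['^'] ++ [',']) ++ pvRender (tok2 :: rest2) := by simp
        rw [hsh, hstr, ih _ (off + 2) hrest
          (by simp only [List.append_assoc, List.mem_append, not_or]
              exact ⟨hpre, by simpa using pvNoLb_flat h1, by simp⟩)
          (fun _ => Or.inl (by rw [List.getLast?_concat]))]
        rw [pvFlatten_cons₂]
        simp [pvFlatTok]

theorem pvNoComma_flatTok (tok : PvTok) (h : pvWfTok tok) : ',' ∉ pvFlatTok tok := by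
  cases tok with
  | plain t => exact h.2.2
  | group u =>
    rw [pvFlatTok, pvReplace_single]
    intro hm
    obtain ⟨x, hx, hxe⟩ := List.mem_map.1 hm
    by_cases hc : x = ','
    · simp [hc] at hxe
    · rw [if_neg hc] at hxe; exact hc hxe

theorem pvSplitAux_flatten : ∀ (toks : List PvTok), toks ≠ [] → (∀ tok ∈ toks, pvWfTok tok) →
    pvSplitAux [] (pvFlatten toks) = toks.map pvFlatTok := by
  intro toks
  induction toks with
  | nil => intro h; exact absurd rfl h
  | cons tok rest ih =>
    intro _ h
    have htok := pvNoComma_flatTok tok (h tok (by simp))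
    have hrest := fun t ht => h t (List.mem_cons_of_mem _ ht)
    cases rest with
    | nil =>
      rw [show pvFlatten [tok] = pvFlatTok tok ++ [] by simp [pvFlatten],
        pvSplitAux_prefix _ _ _ htok]
      simp [pvSplitAux]
    | cons tok2 rest2 =>
      rw [pvFlatten_cons₂, pvSplitAux_prefix _ _ _ htok]
      show pvSplitAux ([] ++ pvFlatTok tok) (',' :: pvFlatten (tok2 :: rest2)) = _
      rw [pvSplitAux]
      simp only [if_pos rfl]
      rw [ih (by simp) hrest]
      simp

theorem pvMem_render : ∀ (toks : List PvTok) (tok : PvTok), tok ∈ toks →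
    ∀ c, c ∈ pvContent tok → c ∈ pvRender toks := by
  intro toks
  induction toks with
  | nil => intro tok h; simp at h
  | cons tok0 rest ih =>
    intro tok htok c hc
    have hrtok : c ∈ pvContent tok0 → c ∈ pvRenderTok tok0 := by
      intro hc
      cases tok0 with
      | plain t => exact hc
      | group u => simp [pvRenderTok, pvContent] at hc ⊢; tauto
    cases rest with
    | nil =>
      rcases List.mem_singleton.1 htok with rfl
      exact hrtok hc
    | cons tok2 rest2 =>
      rw [pvRender_cons₂]
      rcases List.mem_cons.1 htok with rfl | hmem
      · exact List.mem_append.2 (Or.inl (hrtok hc))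
      · exact List.mem_append.2 (Or.inr (List.mem_cons_of_mem _ (ih tok hmem c hc)))

theorem pvRoundtrip (tok : PvTok) (h : pvWfTok tok) (hhat : '^' ∉ pvContent tok) :
    PySem.Chars.replace (pvFlatTok tok) ['^'] [','] = pvContent tok := by
  cases tok with
  | plain t =>
    rw [pvFlatTok, pvContent, pvReplace_single]
    rw [List.map_congr_left (fun c hc => if_neg (by rintro rfl; exact hhat hc))]
    simp
  | group u =>
    rw [pvFlatTok, pvContent, pvReplace_single, pvReplace_single, List.map_map]
    rw [List.map_congr_left (g := id) ?hp]
    simp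
    case hp =>
      intro c hc
      by_cases hcc : c = ','
      · simp [hcc]
      · simp only [Function.comp_apply, if_neg hcc, id]
        rw [if_neg (by rintro rfl; exact hhat hc)]

def pvOK (s : List Char) : Prop :=
  (∀ i, i ≤ s.length → (s.take i).count ']' ≤ (s.take i).count '[' ∧
      (s.take i).count '[' ≤ (s.take i).count ']' + 1)
  ∧ s.count '[' = s.count ']'
  ∧ (∀ i, i < s.length →
      (s[i]? = some '[' → i = 0 ∨ s[i-1]? = some ',') ∧
      (s[i]? = some ']' → i + 1 = s.length ∨ s[i+1]? = some ','))

theorem pvOK_drop (P s2 : List Char) (hcnt : P.count '[' = P.count ']')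
    (h : pvOK (P ++ s2)) : pvOK s2 := by
  obtain ⟨hb, he, ho⟩ := h
  refine ⟨?_, ?_, ?_⟩
  · intro i hi
    have := hb (P.length + i) (by simp; omega)
    rw [List.take_length_add_append, List.count_append, List.count_append] at this
    omega
  · rw [List.count_append, List.count_append] at he
    omega
  · intro i hi
    have hidx : ∀ j, (P ++ s2)[P.length + j]? = s2[j]? := by
      intro j
      rw [List.getElem?_append_right (by omega)]
      congr 1
      omega
    constructor
    · intro hgi
      by_cases h0 : i = 0
      · exact Or.inl h0
      · have := (ho (P.length + i) (by simp; omega)).1 (by rw [hidx]; exact hgi)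
        rcases this with hz | hz
        · omega
        · right
          rw [show P.length + i - 1 = P.length + (i - 1) by omega, hidx] at hz
          exact hz
    · intro hgi
      have := (ho (P.length + i) (by simp; omega)).2 (by rw [hidx]; exact hgi)
      rcases this with hz | hz
      · left; simp at hz ⊢; omega
      · right
        rw [show P.length + i + 1 = P.length + (i + 1) by omega, hidx] at hz
        exact hz

theorem pvDropWhile_head_false {p : Char → Bool} {l xs : List Char} {x : Char}
    (h : l.dropWhile p = x :: xs) : p x = false := by
  induction l with
  | nil => simp at h
  | cons a t ih =>
    rw [List.dropWhile_cons] at h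
    by_cases hp : p a = true
    · rw [if_pos hp] at h; exact ih h
    · rw [if_neg hp] at h
      cases h
      simpa using hp

theorem pvRepr : ∀ (n : Nat) (s : List Char), s.length ≤ n → pvOK s →
    ∃ toks, toks ≠ [] ∧ (∀ tok ∈ toks, pvWfTok tok) ∧ pvRender toks = s := by
  intro n
  induction n with
  | zero =>
    intro s hlen _
    have hnil : s = [] := List.length_eq_zero_iff.1 (by omega)
    subst hnil
    exact ⟨[.plain []], by simp, by simp [pvWfTok], rfl⟩
  | succ m ih =>
    intro s hlen hok
    obtain ⟨hb, he, ho⟩ := hok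
    cases s with
    | nil => exact ⟨[.plain []], by simp, by simp [pvWfTok], rfl⟩
    | cons c rest =>
     by_cases hC : c = '['
     case pos =>
      subst hC
      -- the matching ']' is the first one in rest
      have hsplit := (rest.takeWhile_append_dropWhile (p := fun c => !(c == ']'))).symm
      set u := rest.takeWhile (fun c => !(c == ']')) with hu
      set d := rest.dropWhile (fun c => !(c == ']')) with hd
      have hru : ']' ∉ u := by
        intro hm
        have := List.mem_takeWhile_imp (hu ▸ hm)
        simp at this
      have hdne : d ≠ [] := by
        intro hdnil
        rw [hdnil, List.append_nil] at hsplit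
        have : (('[' :: rest).count ']') = 0 := by
          rw [List.count_eq_zero]
          intro hm
          rcases List.mem_cons.1 hm with hh | hh
          · exact absurd hh.symm (by decide)
          · exact hru (hsplit ▸ hh)
        have h2 : 0 < ('[' :: rest).count '[' := by
          rw [List.count_pos_iff]; simp
        omega
      obtain ⟨x, tail, hdx⟩ := List.exists_cons_of_ne_nil hdne
      have hdd : rest.dropWhile (fun c => !(c == ']')) = x :: tail := by rw [← hd, hdx]
      have hx : x = ']' := by
        have h2 := List.head_dropWhile_not (fun c => !(c == ']')) (l := rest) (by rw [hdd]; simp)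
        rw [show (rest.dropWhile (fun c => !(c == ']'))).head (by rw [hdd]; simp) = x by
          simp [hdd]] at h2
        simpa using h2
      subst hx
      have hrest : rest = u ++ ']' :: tail := by rw [hsplit, hdx]
      have hlb : '[' ∉ u := by
        intro hm
        obtain ⟨j, hj, hjv⟩ := List.mem_iff_getElem.1 hm
        have hcnt := hb (j + 2) (by simp [hrest]; omega)
        have htake : ('[' :: rest).take (j + 2) = '[' :: u.take (j + 1) := by
          rw [hrest, List.take_cons (by omega), show j + 2 - 1 = j + 1 by omega,
            List.take_append_of_le_length (by omega)]
        rw [htake] at hcnt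
        have h1 : ']' ∉ ('[' :: u.take (j + 1)) := by
          intro hmm
          rcases List.mem_cons.1 hmm with hh | hh
          · exact absurd hh.symm (by decide)
          · exact hru (List.mem_of_mem_take hh)
        have h2 : 2 ≤ ('[' :: u.take (j + 1)).count '[' := by
          rw [List.count_cons_self]
          have hmem : '[' ∈ u.take (j + 1) := by
            rw [List.mem_iff_getElem]
            exact ⟨j, by rw [List.length_take]; omega, by rw [List.getElem_take]; exact hjv⟩
          have := List.count_pos_iff.2 hmem
          omega
        rw [List.count_eq_zero.2 h1] at hcnt
        omega
      have hgr : ('[' :: rest)[1 + u.length]? = some ']' := by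
        have hL : ('[' :: u).length = u.length + 1 := by simp
        rw [hrest, show ('[' :: (u ++ ']' :: tail)) = ('[' :: u) ++ ']' :: tail by simp,
          List.getElem?_append_right (by rw [hL]; omega), hL,
          show 1 + u.length - (u.length + 1) = 0 by omega]
        rfl
      rcases (ho (1 + u.length) (by simp [hrest]; omega)).2 hgr with hend | hnext
      · -- the group is the last thing in the string
        have htail : tail = [] := by
          rw [hrest] at hend
          simp at hend
          exact List.length_eq_zero_iff.1 (by omega)
        subst htail
        refine ⟨[.group u], by simp, ?_, ?_⟩
        · intro tok htok
          rcases List.mem_singleton.1 htok with rfl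
          exact ⟨hlb, hru⟩
        · rw [hrest]
          simp [pvRender, pvRenderTok]
      · -- a ',' follows the group
        have htail : ∃ s2, tail = ',' :: s2 := by
          have hL : ('[' :: (u ++ [']'])).length = u.length + 2 := by simp
          cases tail with
          | nil =>
            exfalso
            rw [hrest, show ('[' :: (u ++ ']' :: ([] : List Char))) = '[' :: (u ++ [']']) by simp,
              List.getElem?_eq_none (by rw [hL]; omega)] at hnext
            exact absurd hnext (by simp)
          | cons y s2 =>
            refine ⟨s2, ?_⟩
            rw [hrest,
              show ('[' :: (u ++ ']' :: y :: s2)) = ('[' :: (u ++ [']'])) ++ y :: s2 by simp,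
              List.getElem?_append_right (by rw [hL]; omega), hL,
              show 1 + u.length + 1 - (u.length + 2) = 0 by omega] at hnext
            simp at hnext
            rw [hnext]
        obtain ⟨s2, rfl⟩ := htail
        have hP : ('[' :: rest) = ('[' :: u ++ [']', ',']) ++ s2 := by
          rw [hrest]; simp
        have hok2 : pvOK s2 := by
          apply pvOK_drop ('[' :: u ++ [']', ',']) s2 ?_ (hP ▸ ⟨hb, he, ho⟩)
          rw [show ('[' :: u ++ [']', ',']) = '[' :: (u ++ [']', ',']) by simp]
          simp [List.count_cons, List.count_append, List.count_eq_zero.2 hlb,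
            List.count_eq_zero.2 hru]
        obtain ⟨toks2, htne, htwf, htr⟩ := ih s2 (by rw [hP] at hlen; simp at hlen; omega) hok2
        refine ⟨.group u :: toks2, by simp, ?_, ?_⟩
        · intro tok htok
          rcases List.mem_cons.1 htok with rfl | hh
          · exact ⟨hlb, hru⟩
          · exact htwf tok hh
        · obtain ⟨t2, ts2, rfl⟩ := List.exists_cons_of_ne_nil htne
          rw [pvRender_cons₂, htr, hrest]
          simp [pvRenderTok]
     case neg =>
      by_cases hR : c = ']'
      case pos =>
        exfalso
        subst hR
        have := (hb 1 (by simp)).1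
        simp at this
      case neg =>
      by_cases hM : c = ','
      case pos =>
        subst hM
        have hok2 : pvOK rest := pvOK_drop [','] rest (by decide) ⟨hb, he, ho⟩
        obtain ⟨toks2, htne, htwf, htr⟩ := ih rest (by simp at hlen; omega) hok2
        refine ⟨.plain [] :: toks2, by simp, ?_, ?_⟩
        · intro tok htok
          rcases List.mem_cons.1 htok with rfl | hh
          · exact ⟨by simp, by simp, by simp⟩
          · exact htwf tok hh
        · obtain ⟨t2, ts2, rfl⟩ := List.exists_cons_of_ne_nil htne
          rw [pvRender_cons₂, htr]
          simp [pvRenderTok]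
      case neg =>
      have hsplit := ((c :: rest).takeWhile_append_dropWhile
        (p := fun x => !(x == '[' || x == ']' || x == ','))).symm
      set t := (c :: rest).takeWhile (fun x => !(x == '[' || x == ']' || x == ',')) with ht
      set d := (c :: rest).dropWhile (fun x => !(x == '[' || x == ']' || x == ',')) with hd
      have htmem : ∀ x ∈ t, x ≠ '[' ∧ x ≠ ']' ∧ x ≠ ',' := by
        intro x hx
        have h' := List.mem_takeWhile_imp (ht ▸ hx)
        simp at h'
        exact ⟨h'.1.1, h'.1.2, h'.2⟩
      have htne : t ≠ [] := by
        rw [ht, List.takeWhile_cons, if_pos (by simp [hC, hR, hM])]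
        simp
      have hwfp : pvWfTok (.plain t) := by
        exact ⟨fun hm => (htmem _ hm).1 rfl, fun hm => (htmem _ hm).2.1 rfl,
          fun hm => (htmem _ hm).2.2 rfl⟩
      cases hdx : d with
      | nil =>
        have hst : c :: rest = t := by rw [hsplit, hdx, List.append_nil]
        refine ⟨[.plain t], by simp, ?_, by rw [hst]; simp [pvRender, pvRenderTok]⟩
        intro tok htok
        rcases List.mem_singleton.1 htok with rfl
        exact hwfp
      | cons x s2 =>
        have hdd2 : (c :: rest).dropWhile (fun x => !(x == '[' || x == ']' || x == ',')) = x :: s2 := by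
          rw [← hd]; exact hdx
        have hxp : (fun x => !(x == '[' || x == ']' || x == ',')) x = false :=
          pvDropWhile_head_false hdd2
        have hst : c :: rest = t ++ x :: s2 := by rw [hsplit, hdx]
        have htpos : 0 < t.length := List.length_pos_iff.2 htne
        by_cases hx1 : x = '['
        · exfalso
          subst hx1
          have hL : t.length < (c :: rest).length := by
            rw [hst]; simp
          have hgi : (c :: rest)[t.length]? = some '[' := by
            rw [hst, List.getElem?_append_right (le_refl _), Nat.sub_self]
            rfl
          rcases (ho t.length hL).1 hgi with h0 | hcm
          · exact htne (List.length_eq_zero_iff.1 h0)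
          · have hmm : ',' ∈ t := by
              rw [hst, List.getElem?_append_left (by omega)] at hcm
              exact List.mem_of_getElem? hcm
            exact (htmem ',' hmm).2.2 rfl
        by_cases hx2 : x = ']'
        · exfalso
          subst hx2
          have hcnt := (hb (t.length + 1) (by rw [hst]; simp)).1
          have htake : (c :: rest).take (t.length + 1) = t ++ [']'] := by
            rw [hst, List.take_length_add_append]
            simp
          rw [htake, List.count_append, List.count_append,
            List.count_eq_zero.2 (fun hm => (htmem _ hm).1 rfl),
            List.count_eq_zero.2 (fun hm => (htmem _ hm).2.1 rfl)] at hcnt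
          simp at hcnt
        have hx3 : x = ',' := by
          simp at hxp
          tauto
        subst hx3
        have hPP : c :: rest = (t ++ [',']) ++ s2 := by rw [hst]; simp
        have hok2 : pvOK s2 := by
          apply pvOK_drop (t ++ [',']) s2 ?_ (hPP ▸ ⟨hb, he, ho⟩)
          rw [List.count_append, List.count_append,
            List.count_eq_zero.2 (fun hm => (htmem _ hm).1 rfl),
            List.count_eq_zero.2 (fun hm => (htmem _ hm).2.1 rfl)]
          rfl
        obtain ⟨toks2, htne2, htwf, htr⟩ := ih s2
          (by have h := congrArg List.length hPP; simp at h hlen; omega) hok2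
        refine ⟨.plain t :: toks2, by simp, ?_, ?_⟩
        · intro tok htok
          rcases List.mem_cons.1 htok with rfl | hh
          · exact hwfp
          · exact htwf tok hh
        · obtain ⟨t2, ts2, rfl⟩ := List.exists_cons_of_ne_nil htne2
          rw [pvRender_cons₂, htr, hst]
          simp [pvRenderTok]

theorem pvReplaceGo_del (a : Char) : ∀ (l : List Char) (fuel : Nat) (acc : List Char),
    l.length ≤ fuel →
    PySem.Chars.replace.go [a] [] fuel l acc = acc.reverse ++ l.filter (fun c => !(c == a)) := by
  intro l
  induction l with
  | nil => intro fuel acc h; cases fuel <;> simp [PySem.Chars.replace.go]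
  | cons c t ih =>
    intro fuel acc h
    cases fuel with
    | zero => simp at h
    | succ m =>
      simp only [PySem.Chars.replace.go, List.isPrefixOf]
      by_cases hc : c = a
      · subst hc
        rw [if_pos (by simp)]
        simp only [List.length_cons, List.drop_succ_cons, List.length_nil, List.drop_zero]
        rw [ih m _ (by simpa using h)]
        simp
      · rw [if_neg (by simp [Ne.symm hc])]
        rw [ih m _ (by simpa using h)]
        simp [hc]

theorem pvReplace_del (a : Char) (s : List Char) :
    PySem.Chars.replace s [a] [] = s.filter (fun c => !(c == a)) := by
  rw [PySem.Chars.replace]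
  simp [pvReplaceGo_del a s s.length [] le_rfl]

theorem pvFinal (gpus : String) (hpre : Pre_split_gpus gpus) :
    split_gpus gpus = split_gpus_alt gpus := by
  obtain ⟨hnd, hok'⟩ := hpre
  have hok : pvOK (PySem.Chars.replace gpus.toList [' '] []) := hok'
  obtain ⟨toks, hne, hwf, hrend⟩ :=
    pvRepr (PySem.Chars.replace gpus.toList [' '] []).length _ le_rfl hok
  have hhat : '^' ∉ pvRender toks := by
    rw [hrend, pvReplace_del]
    exact fun hm => hnd (List.mem_of_mem_filter hm)
  obtain ⟨hfl, hfr⟩ := pvFcp_render toks hwf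
  have hno := pvOrd_nonest (pvPairs toks 0) 0 (pvOrd_pairs toks 0 0 le_rfl)
  have hzip : ((pvPairs toks 0).map Prod.fst).zip ((pvPairs toks 0).map Prod.snd)
      = pvPairs toks 0 := by
    rw [List.zip_map']
    simp
  have hloop : splitGpusLoopA (pvPairs toks 0) (pvRender toks) 0 = some (pvFlatten toks) := by
    have h0 := pvLoopA_inv toks [] 0 hwf (by simp) (fun _ => Or.inr rfl)
    simpa using h0
  rw [split_gpus, split_gpus_alt, ← hrend, hfl, hfr,
    if_neg (by simp), if_neg (by rw [hno]; simp), hzip, hloop,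
    pvScanB_render toks hne hwf []]
  show List.map (fun g => String.ofList (PySem.Chars.replace g ['^'] [',']))
      (PySem.Chars.splitOn (pvFlatten toks) [','])
    = List.map String.ofList ([] ++ List.map pvContent toks)
  rw [pvSplitOn_eq, pvSplitAux_flatten toks hne hwf, List.map_map, List.nil_append, List.map_map]
  apply List.map_congr_left
  intro tok htok
  simp only [Function.comp_apply]
  rw [pvRoundtrip tok (hwf tok htok) (fun hc => hhat (pvMem_render toks tok htok '^' hc))]

-- ===== VERDICT (by name: the statement is the Claim_ definition above) =====
theorem split_gpus_spec : Claim_equal_split_gpus := by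
  intro gpus _ hpre
  exact pvFinal gpus hpre
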